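-- pv_equiv track=rewrite | github.com/ForrestHilton/manim-lamination-builder | manim_lamination_builder/deployment_sequences.py | full_orbits
-- ===== SOURCE A (Python) =====
-- def rotate_point(point):
--     newPoint = point[1:] + point[:1]
--     return newPoint
--
-- def flatten_point(point: list):
--     fp = 0
--     l = len(point)
--     for j in range(l):
--         fp += point[l - j - 1] * (10**j)
--     return fp
--
-- def full_orbits(point):
--     p = point[:]
--     fOrbit = []
--     sOrbit = []
--     tOrbit = []
--     for i in range(len(point)):
--         p = rotate_point(p)
--         fOrbit += [p]
--     flOrbit = [flatten_point(fo) for fo in fOrbit]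
--     flOrbit = quicksort(flOrbit)
--     for fl in flOrbit:
--         for f in fOrbit:
--             if fl == flatten_point(f):
--                 sOrbit += [f]
--     startPoint = flOrbit[0]
--     startIndex = flOrbit.index(startPoint)
--     l = len(flOrbit)
--     for i in range(l):
--         tOrbit += [fOrbit[(startPoint + i) % l]]
--     return (tOrbit, sOrbit)
--
-- def quicksort(arr):
--     if len(arr) <= 1:
--         return arr
--     else:
--         pivot = arr[0]
--         less = [i for i in arr[1:] if i <= pivot]
--         greater = [i for i in arr[1:] if i > pivot]
--         return quicksort(less) + [pivot] + quicksort(greater)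
-- ===== SOURCE B (Python) =====
-- def full_orbits(point):
--     n = len(point)
--     # all rotations, by slicing (A builds them by repeated single rotation)
--     fOrbit = [point[i + 1:] + point[:i + 1] for i in range(n)]
--
--     def horner(pt):
--         v = 0
--         for x in pt:
--             v = v * 10 + x
--         return v
--
--     flOrbit = [horner(f) for f in fOrbit]
--     group = {}
--     for fl, f in zip(flOrbit, fOrbit):
--         group.setdefault(fl, []).append(f)
--     flSorted = sorted(flOrbit)
--     sOrbit = []
--     for fl in flSorted:
--         sOrbit += group[fl]
--     s = flSorted[0] % n
--     tOrbit = fOrbit[s:] + fOrbit[:s]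
--     return (tOrbit, sOrbit)
-- ===== Notes on version B (the rewrite author's own statement) =====
-- stated objective: faster
-- what changed: B builds all rotations directly by slicing instead of A's repeated single-rotation loop, flattens each rotation with Horner's rule instead of an indexed power-of-10 sum, replaces A's hand-written quicksort plus nested rescan (which recomputes flatten_point for every (sorted value, rotation) pair) by a grouping dict built in one pass plus the builtin sorted(), and produces tOrbit by two slices instead of an indexing loop.
import Mathlib
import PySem

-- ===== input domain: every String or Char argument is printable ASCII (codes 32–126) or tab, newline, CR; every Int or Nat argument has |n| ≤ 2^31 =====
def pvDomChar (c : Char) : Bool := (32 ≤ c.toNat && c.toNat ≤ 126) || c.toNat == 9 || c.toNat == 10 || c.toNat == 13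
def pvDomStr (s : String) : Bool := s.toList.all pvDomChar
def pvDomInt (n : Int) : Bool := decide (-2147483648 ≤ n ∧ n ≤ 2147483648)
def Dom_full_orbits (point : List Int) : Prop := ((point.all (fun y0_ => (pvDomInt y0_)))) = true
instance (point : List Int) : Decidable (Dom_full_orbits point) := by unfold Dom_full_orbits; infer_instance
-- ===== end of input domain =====

-- B builds all rotations by slicing instead of repeated single rotation, flattens with Horner's rule,
-- replaces quicksort + nested rescan by a grouping dict plus the builtin sort, and rotates fOrbit by
-- two slices instead of an indexing loop (measurably faster); values agree on every nonempty list
-- (Python A raises IndexError on the empty list).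

-- ===== PORT A =====
def rotate_point (point : List Int) : List Int :=
  PySem.List.slice point (some 1) none ++ PySem.List.slice point none (some 1)

def flatten_point (point : List Int) : Int :=
  -- point[l - j - 1] is always in range (0 ≤ j < l), so pyGetD is exact here
  (PySem.List.pyRange 0 (point.length : Int) 1).foldl
    (fun fp j => fp + PySem.List.pyGetD point ((point.length : Int) - j - 1) 0 * 10 ^ j.toNat) 0

def quicksort : List Int → List Int
  | [] => []
  | [x] => [x]
  | pivot :: rest =>
      quicksort (rest.filter (fun i => decide (i ≤ pivot))) ++ [pivot] ++
        quicksort (rest.filter (fun i => decide (pivot < i)))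
termination_by arr => arr.length
decreasing_by
  all_goals simp
  all_goals exact le_trans (List.length_filter_le _ _) (by simp)

def full_orbits (point : List Int) : List (List Int) × List (List Int) :=
  let st := (PySem.List.pyRange 0 (point.length : Int) 1).foldl
      (fun (st : List Int × List (List Int)) _ =>
        let p' := rotate_point st.1
        (p', st.2 ++ [p'])) (point, [])
  let fOrbit := st.2
  let flOrbit0 := fOrbit.map (fun fo => flatten_point fo)
  let flOrbit := quicksort flOrbit0
  let sOrbit := flOrbit.foldl
      (fun acc fl => fOrbit.foldl
        (fun acc2 f => if fl == flatten_point f then acc2 ++ [f] else acc2) acc) []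
  -- indexing the sorted list at position 0 raises IndexError iff point is empty; excluded by Pre_full_orbits
  let startPoint := (PySem.List.pyGet? flOrbit 0).getD 0
  let _startIndex := PySem.List.index? flOrbit startPoint
  let l : Int := (flOrbit.length : Int)
  let tOrbit := (PySem.List.pyRange 0 l 1).foldl
      (fun acc i =>
        acc ++ [(PySem.List.pyGet? fOrbit (PySem.Int.mod (startPoint + i) l)).getD []]) []
  (tOrbit, sOrbit)

-- ===== PORT B =====
def horner (pt : List Int) : Int := pt.foldl (fun v x => v * 10 + x) 0

def full_orbits_alt (point : List Int) : List (List Int) × List (List Int) :=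
  let n : Int := (point.length : Int)
  let fOrbit := (PySem.List.pyRange 0 n 1).map
      (fun i => PySem.List.slice point (some (i + 1)) none ++ PySem.List.slice point none (some (i + 1)))
  let flOrbit := fOrbit.map horner
  let group := (flOrbit.zip fOrbit).foldl
      (fun (d : PySem.Dict Int (List (List Int))) q => d.modify q.1 [] (fun v => v ++ [q.2]))
      PySem.Dict.empty
  let flSorted := PySem.List.sorted flOrbit (fun x => x) false
  -- group[fl]: every fl of flSorted is a key of group, so getD is exact (no KeyError)
  let sOrbit := flSorted.foldl (fun acc fl => acc ++ group.getD fl []) []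
  -- flSorted[0] raises IndexError iff point is empty; excluded by Pre_full_orbits
  let s := PySem.Int.mod ((PySem.List.pyGet? flSorted 0).getD 0) n
  let tOrbit := PySem.List.slice fOrbit (some s) none ++ PySem.List.slice fOrbit none (some s)
  (tOrbit, sOrbit)

-- ===== PRECONDITION & SPEC =====
-- Pre_ excludes only the empty list, on which Python A (and B) raise IndexError when taking the smallest flatten value.
def Pre_full_orbits (point : List Int) : Prop := point ≠ []
instance (point : List Int) : Decidable (Pre_full_orbits point) := by unfold Pre_full_orbits; infer_instance
def pvWitness_full_orbits : List Int := [1, 2, 0]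

def Spec_full_orbits (point : List Int) (out : List (List Int) × List (List Int)) : Prop := out = full_orbits_alt point
instance (point : List Int) (out : List (List Int) × List (List Int)) : Decidable (Spec_full_orbits point out) := by unfold Spec_full_orbits; infer_instance

-- ===== CLAIM (what is proved, stated in full; the proofs are below) =====
def Claim_equal_full_orbits : Prop := ∀ (point : List Int), Dom_full_orbits point → Pre_full_orbits point → Spec_full_orbits point (full_orbits point)

-- ===== LEMMAS AND PROOFS =====

-- rotation helpers
theorem rotate_point_eq (p : List Int) : rotate_point p = p.rotate 1 := by
  cases p with
  | nil => rfl
  | cons x xs =>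
    rw [rotate_point, List.rotate_eq_drop_append_take (by simp)]
    rw [PySem.List.slice_from_one, PySem.List.slice_to _ (by omega)]
    rfl

-- A's rotation-building fold produces the successive rotations
theorem fold_rot {α : Type} (r : List α) : ∀ (p : List Int) (acc : List (List Int)),
    ((r.foldl (fun (st : List Int × List (List Int)) _ =>
        (rotate_point st.1, st.2 ++ [rotate_point st.1])) (p, acc)).2)
      = acc ++ (List.range r.length).map (fun k => p.rotate (k + 1)) := by
  induction r with
  | nil => simp
  | cons _ xs ih =>
    intro p acc
    simp only [List.foldl_cons, ih, List.length_cons, List.range_succ_eq_map]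
    simp [rotate_point_eq, List.rotate_rotate, Function.comp]
    intro a _
    congr 1
    omega

-- B's slice comprehension produces the same rotations
theorem slice_map_eq_rot (point : List Int) :
    (PySem.List.pyRange 0 (point.length : Int) 1).map
        (fun i => PySem.List.slice point (some (i + 1)) none
          ++ PySem.List.slice point none (some (i + 1)))
      = (List.range point.length).map (fun k => point.rotate (k + 1)) := by
  rw [PySem.List.pyRange_one, List.map_map]
  simp only [Int.sub_zero, Int.toNat_natCast]
  apply List.map_congr_left
  intro k hk
  rw [List.mem_range] at hk
  simp only [Function.comp]
  have h1 : (0 : Int) + (k : Int) + 1 = ((k + 1 : Nat) : Int) := by push_cast; ring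
  rw [h1, PySem.List.slice_from_natCast, PySem.List.slice_to_natCast,
    ← List.rotate_eq_drop_append_take (by omega)]

-- quicksort is Python's sorted
theorem qs_perm (l : List Int) : (quicksort l).Perm l := by
  induction l using quicksort.induct with
  | case1 => simp [quicksort]
  | case2 x => simp [quicksort]
  | case3 pivot rest h ih1 ih2 =>
    rw [List.unattach_filter (g := fun i => decide (i ≤ pivot)) (hf := fun x h => rfl),
      List.unattach_attach] at ih1
    rw [List.unattach_filter (g := fun i => decide (pivot < i)) (hf := fun x h => rfl),
      List.unattach_attach] at ih2
    rw [quicksort]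
    have hfil : rest.filter (fun i => decide (pivot < i))
        = rest.filter (fun i => !(decide (i ≤ pivot))) := by
      apply List.filter_congr; intro i _
      by_cases hip : i ≤ pivot
      · simp [hip, not_lt.mpr hip]
      · simp [hip, not_le.mp hip]
    have hperm : ((rest.filter (fun i => decide (i ≤ pivot))) ++
        (rest.filter (fun i => decide (pivot < i)))).Perm rest := by
      rw [hfil]; exact List.filter_append_perm _ rest
    refine ((ih1.append (List.Perm.refl [pivot])).append ih2).trans ?_
    have hshape : rest.filter (fun i => decide (i ≤ pivot)) ++ [pivot] ++
          rest.filter (fun i => decide (pivot < i))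
        = rest.filter (fun i => decide (i ≤ pivot)) ++
          pivot :: rest.filter (fun i => decide (pivot < i)) := by simp
    rw [hshape]
    exact List.perm_middle.trans (List.Perm.cons pivot hperm)
    exact h

theorem mem_qs {x : Int} {l : List Int} (h : x ∈ quicksort l) : x ∈ l :=
  (qs_perm l).mem_iff.mp h

theorem qs_pairwise (l : List Int) : (quicksort l).Pairwise (· ≤ ·) := by
  induction l using quicksort.induct with
  | case1 => simp [quicksort]
  | case2 x => simp [quicksort]
  | case3 pivot rest h ih1 ih2 =>
    rw [List.unattach_filter (g := fun i => decide (i ≤ pivot)) (hf := fun x h => rfl),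
      List.unattach_attach] at ih1
    rw [List.unattach_filter (g := fun i => decide (pivot < i)) (hf := fun x h => rfl),
      List.unattach_attach] at ih2
    rw [quicksort]
    rw [List.append_assoc]
    rw [List.pairwise_append]
    refine ⟨ih1, ?_, ?_⟩
    · rw [List.singleton_append, List.pairwise_cons]
      refine ⟨?_, ih2⟩
      intro y hy
      have := mem_qs hy
      simp at this
      exact le_of_lt this.2
    · intro a ha b hb
      have ha' := mem_qs ha
      simp at ha'
      simp at hb
      rcases hb with hb | hb
      · exact hb ▸ ha'.2
      · have := mem_qs hb
        simp at this
        exact le_trans ha'.2 (le_of_lt this.2)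
    exact h

theorem qs_eq_sorted (l : List Int) : PySem.List.sorted l (fun x => x) false = quicksort l :=
  PySem.List.sorted_id_eq_of_perm_of_pairwise l (quicksort l) (qs_perm l) (qs_pairwise l)

-- flatten_point as a sum of digits times powers of 10
theorem flat_sum (pt : List Int) :
    flatten_point pt
      = ((List.range pt.length).map (fun k => pt.getD (pt.length - 1 - k) 0 * 10 ^ k)).sum := by
  rw [flatten_point, PySem.List.pyRange_one, List.foldl_map]
  simp only [Int.sub_zero, Int.toNat_natCast, zero_add]
  rw [PySem.List.foldl_add (g := fun (k : Nat) =>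
    PySem.List.pyGetD pt ((pt.length : Int) - (k : Int) - 1) 0 * 10 ^ k)]
  rw [zero_add]
  apply congrArg
  apply List.map_congr_left
  intro k hk
  rw [List.mem_range] at hk
  have h1 : (pt.length : Int) - (k : Int) - 1 = ((pt.length - 1 - k : Nat) : Int) := by
    omega
  rw [h1, PySem.List.pyGetD_natCast]

theorem flat_sum_cons (x : Int) (xs : List Int) :
    flatten_point (x :: xs) = x * 10 ^ xs.length + flatten_point xs := by
  rw [flat_sum, flat_sum]
  rw [List.length_cons, List.range_succ, List.map_append, List.sum_append]
  have hlast : (List.map (fun k => (x :: xs).getD (xs.length + 1 - 1 - k) 0 * 10 ^ k)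
      [xs.length]).sum = x * 10 ^ xs.length := by simp
  have hcongr : List.map (fun k => (x :: xs).getD (xs.length + 1 - 1 - k) 0 * 10 ^ k)
        (List.range xs.length)
      = List.map (fun k => xs.getD (xs.length - 1 - k) 0 * 10 ^ k) (List.range xs.length) := by
    apply List.map_congr_left
    intro k hk
    rw [List.mem_range] at hk
    have h2 : xs.length + 1 - 1 - k = (xs.length - 1 - k) + 1 := by omega
    rw [h2, List.getD_cons_succ]
  rw [hlast, hcongr]
  ring

-- Horner with an accumulator
theorem horner_acc (xs : List Int) : ∀ (a : Int),
    xs.foldl (fun v x => v * 10 + x) a = a * 10 ^ xs.length + horner xs := by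
  induction xs with
  | nil => intro a; simp [horner]
  | cons x xs ih =>
    intro a
    have h2 : horner (x :: xs) = x * 10 ^ xs.length + horner xs := by
      simp only [horner, List.foldl_cons, ih (0 * 10 + x)]
      ring
    simp only [List.foldl_cons, ih (a * 10 + x), h2, List.length_cons]
    ring

theorem flatten_eq_horner : flatten_point = horner := by
  funext pt
  induction pt with
  | nil => rfl
  | cons x xs ih =>
    rw [flat_sum_cons, ih]
    have := horner_acc xs (0 * 10 + x)
    simp only [horner, List.foldl_cons] at *
    rw [this]
    ring

-- the grouping dict looked up at c is exactly the filter A's inner loop computes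
theorem zip_map_filter (xs : List (List Int)) (g : List Int → Int) (c : Int) :
    ((((xs.map g).zip xs).filter (fun q => q.1 == c)).map (fun q => q.2))
      = xs.filter (fun x => g x == c) := by
  induction xs with
  | nil => simp
  | cons x xs ih =>
    simp only [List.map_cons, List.zip_cons_cons, List.filter_cons]
    by_cases h : g x == c
    · simp [h, ih]
    · simp [h, ih]

theorem group_getD (flOrbit : List Int) (fOrbit : List (List Int)) (c : Int) :
    ((flOrbit.zip fOrbit).foldl
        (fun d q => d.modify q.1 [] (fun v => v ++ [q.2])) PySem.Dict.empty).getD c []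
      = (((flOrbit.zip fOrbit).filter (fun q => q.1 == c)).map (fun q => q.2)) := by
  have := PySem.Dict.getD_foldl_modify_append (flOrbit.zip fOrbit) (PySem.Dict.empty) c
  simpa using this

-- the indexed-rotation map equals the two-slice rotation
theorem rot_map_eq_slices (xs : List (List Int)) (n sp : Int)
    (hn : n = (xs.length : Int)) (h : 0 < xs.length) :
    (PySem.List.pyRange 0 n 1).map
        (fun i => (PySem.List.pyGet? xs (PySem.Int.mod (sp + i) n)).getD [])
      = PySem.List.slice xs (some (PySem.Int.mod sp n)) none
        ++ PySem.List.slice xs none (some (PySem.Int.mod sp n)) := by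
  subst hn
  have hpos : (0 : Int) < (xs.length : Int) := by exact_mod_cast h
  have hm0 : 0 ≤ PySem.Int.mod sp (xs.length : Int) := PySem.Int.mod_nonneg _ hpos
  have hmlt : PySem.Int.mod sp (xs.length : Int) < (xs.length : Int) :=
    PySem.Int.mod_lt _ hpos
  rw [PySem.List.slice_from _ hm0, PySem.List.slice_to _ hm0]
  have hsn : (PySem.Int.mod sp (xs.length : Int)).toNat < xs.length := by omega
  rw [← List.rotate_eq_drop_append_take (le_of_lt hsn)]
  apply List.ext_getElem
  · simp [PySem.List.length_pyRange_one]
  · intro k h1 h2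
    have hk : k < xs.length := by
      simpa [PySem.List.length_pyRange_one] using h1
    rw [List.getElem_map, PySem.List.getElem_pyRange_one, List.getElem_rotate]
    have hemod : PySem.Int.mod sp (xs.length : Int) = sp % (xs.length : Int) :=
      PySem.Int.mod_eq_emod_of_pos hpos
    have harith : PySem.Int.mod (sp + (0 + (k : Int))) (xs.length : Int)
        = (((k + (PySem.Int.mod sp (xs.length : Int)).toNat) % xs.length : Nat) : Int) := by
      have hm0' : 0 ≤ sp % (xs.length : Int) := by rw [hemod] at hm0; exact hm0
      have hcast : ((sp % (xs.length : Int)).toNat : Int) = sp % (xs.length : Int) := by omega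
      rw [PySem.Int.mod_eq_emod_of_pos hpos, hemod]
      push_cast
      rw [hcast]
      have hkmod : (k : Int) % (xs.length : Int) = (k : Int) :=
        Int.emod_eq_of_lt (by positivity) (by exact_mod_cast hk)
      calc (sp + (0 + (k : Int))) % (xs.length : Int)
          = (sp % (xs.length : Int) + (k : Int) % (xs.length : Int)) % (xs.length : Int) := by
            rw [zero_add, Int.add_emod]
        _ = ((k : Int) + sp % (xs.length : Int)) % (xs.length : Int) := by
            rw [hkmod, Int.add_comm]
    rw [harith, PySem.List.pyGet?_natCast]
    rw [List.getElem?_eq_getElem (Nat.mod_lt _ h)]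
    rfl

-- ===== VERDICT helper steps are inlined below =====
theorem full_orbits_spec : Claim_equal_full_orbits := by
  intro point _hdom hpre
  have hlen : 0 < point.length := List.length_pos_iff.mpr hpre
  unfold Spec_full_orbits full_orbits full_orbits_alt
  simp only [flatten_eq_horner]
  rw [fold_rot, qs_eq_sorted, slice_map_eq_rot]
  simp only [List.nil_append, PySem.List.length_pyRange_one, Int.sub_zero, Int.toNat_natCast]
  set R := (List.range point.length).map (fun k => point.rotate (k + 1)) with hR
  have hRlen : R.length = point.length := by simp [hR]
  set FL := R.map horner with hFL
  -- sOrbit: each step of A's nested loop appends exactly the group chunk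
  have hchunk : (fun (acc : List (List Int)) fl => R.foldl
        (fun acc2 f => if fl == horner f then acc2 ++ [f] else acc2) acc)
      = (fun acc fl => acc ++ (((FL.zip R).foldl
          (fun d q => d.modify q.1 [] (fun v => v ++ [q.2])) PySem.Dict.empty).getD fl [])) := by
    funext acc fl
    rw [group_getD, hFL, zip_map_filter]
    rw [PySem.List.foldl_append_if]
    congr 1
    rw [List.map_id']
    apply List.filter_congr
    intro f _
    simp [@eq_comm Int fl]
  rw [hchunk]
  -- tOrbit: A's index loop is B's two slices
  have hql : ((quicksort FL).length : Int) = (point.length : Int) := by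
    have h1 := (qs_perm FL).length_eq
    rw [hFL] at h1 ⊢
    rw [h1]
    simp [hRlen]
  rw [hql, PySem.List.foldl_append_singleton_eq_map, List.nil_append]
  rw [rot_map_eq_slices R (point.length : Int) _ (by rw [hRlen]) (by omega)]
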